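-- pv_equiv track=rewrite | github.com/asilverlight/Application-of-large-language-models-in-document-re-ranking | scripts/process_data/utils.py | find_duplicate_db
-- ===== SOURCE A (Python) =====
-- def find_duplicate_db(data):
--     seen = set()
--     yes = True
--     for item in data["doc_2"]:
--         prefix = item["content"]
--         if prefix in seen:
--             yes = False
--             break
--         else:
--             seen.add(prefix)
--     if(yes):
--         seen = set()
--         for item in data["doc_1"]:
--             prefix = item["content"]
--             if prefix in seen:
--                 yes = False
--                 break
--             else:
--                 seen.add(prefix)
--     if(yes):
--         seen = set()
--         for item in data["doc_0"]:
--             prefix = item["content"]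
--             if prefix in seen:
--                 yes = False
--                 break
--             else:
--                 seen.add(prefix)
--     return not yes
-- ===== SOURCE B (Python) =====
-- def find_duplicate_db(data):
--     # Sort-then-adjacent-scan: a list holds a duplicate "content" iff after
--     # sorting the contents two equal ones are adjacent.  The loop keeps the
--     # original doc_2 -> doc_1 -> doc_0 short-circuit order.
--     for k in ("doc_2", "doc_1", "doc_0"):
--         contents = sorted(item["content"] for item in data[k])
--         if any(a == b for a, b in zip(contents, contents[1:])):
--             return True
--     return False
-- ===== Notes on version B (the rewrite author's own statement) =====
-- stated objective: alternative
-- what changed: Replaces the incremental seen-set scans that break at the first collision with sort-then-adjacent-scan: each list's contents are sorted and a duplicate exists iff two equal contents are adjacent; the key loop with early return keeps the doc_2->doc_1->doc_0 short-circuit.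
import Mathlib
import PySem

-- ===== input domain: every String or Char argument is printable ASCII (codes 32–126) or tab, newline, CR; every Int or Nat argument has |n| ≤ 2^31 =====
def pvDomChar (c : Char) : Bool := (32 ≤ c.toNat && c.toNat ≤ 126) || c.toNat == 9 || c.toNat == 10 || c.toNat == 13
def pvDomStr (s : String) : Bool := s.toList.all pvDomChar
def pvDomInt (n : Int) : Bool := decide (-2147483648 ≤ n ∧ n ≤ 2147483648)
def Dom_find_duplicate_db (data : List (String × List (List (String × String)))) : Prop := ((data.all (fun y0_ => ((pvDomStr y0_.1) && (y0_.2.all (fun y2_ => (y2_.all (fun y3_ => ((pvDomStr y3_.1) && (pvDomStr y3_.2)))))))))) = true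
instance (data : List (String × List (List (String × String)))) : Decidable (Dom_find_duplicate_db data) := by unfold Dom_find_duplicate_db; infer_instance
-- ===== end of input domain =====

-- B replaces A's incremental seen-set scans with sort-then-adjacent-scan per list,
-- a genuinely different algorithm of similar cost (objective: alternative).

-- shared helpers for 'data[k]' and 'item["content"]' (total via getD; Pre_ excludes the KeyError inputs).
-- The association lists encode Python dicts; on duplicate keys dict(pairs) keeps the LAST value,
-- so the lookup reads the last matching pair.
def pvGetLast? {V : Type} (pairs : List (String × V)) (k : String) : Option V :=
  (PySem.Dict.mk pairs.reverse).get? k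
def pvLookup (data : List (String × List (List (String × String)))) (k : String) : List (List (String × String)) :=
  (pvGetLast? data k).getD []
def pvContent (item : List (String × String)) : String :=
  (pvGetLast? item "content").getD ""

-- ===== PORT A =====
-- A's per-list loop: seen-set scan, breaking (yes := false) at the first repeated content
def pvLoopA (items : List (List (String × String))) (seen : PySem.Set String) : Bool :=
  match items with
  | [] => true
  | item :: rest =>
    let pfx := pvContent item
    if pfx ∈ seen then false
    else pvLoopA rest (PySem.Set.add seen pfx)

def find_duplicate_db (data : List (String × List (List (String × String)))) : Bool :=
  let yes := pvLoopA (pvLookup data "doc_2") PySem.Set.empty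
  let yes := if yes then pvLoopA (pvLookup data "doc_1") PySem.Set.empty else yes
  let yes := if yes then pvLoopA (pvLookup data "doc_0") PySem.Set.empty else yes
  !yes

-- ===== PORT B =====
-- any(a == b for a, b in zip(contents, contents[1:]))
def pvAdjDup (cs : List String) : Bool :=
  (cs.zip cs.tail).any (fun p => p.1 == p.2)

-- contents = sorted(item["content"] for item in data[k]); adjacent-equal scan
def pvSortedDup (data : List (String × List (List (String × String)))) (k : String) : Bool :=
  pvAdjDup (PySem.List.sorted ((pvLookup data k).map pvContent) (fun x => x) false)

-- the 'for k in (...): if ...: return True' loop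
def pvLoopB (data : List (String × List (List (String × String)))) : List String → Bool
  | [] => false
  | k :: ks => if pvSortedDup data k then true else pvLoopB data ks

def find_duplicate_db_alt (data : List (String × List (List (String × String)))) : Bool :=
  pvLoopB data ["doc_2", "doc_1", "doc_0"]

-- ===== PRECONDITION & SPEC =====
-- Pre_ excludes exactly the inputs on which A or B raises KeyError: a doc key missing when its
-- list would be reached, or a reached list holding an item without a "content" key — in particular
-- inputs where A breaks at an early duplicate and so returns True although a later item of that
-- list (or a later list) lacks "content" are excluded, because B's sorted() consumes every item
-- of each list it reaches and raises KeyError there (see cites).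
def pvAllContent (l : List (List (String × String))) : Prop :=
  ∀ item ∈ l, (pvGetLast? item "content").isSome = true
def Pre_find_duplicate_db (data : List (String × List (List (String × String)))) : Prop :=
  (pvGetLast? data "doc_2").isSome = true ∧ pvAllContent (pvLookup data "doc_2") ∧
  (((pvLookup data "doc_2").map pvContent).Nodup →
    (pvGetLast? data "doc_1").isSome = true ∧ pvAllContent (pvLookup data "doc_1") ∧
    (((pvLookup data "doc_1").map pvContent).Nodup →
      (pvGetLast? data "doc_0").isSome = true ∧ pvAllContent (pvLookup data "doc_0")))
instance (data : List (String × List (List (String × String)))) : Decidable (Pre_find_duplicate_db data) := by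
  unfold Pre_find_duplicate_db pvAllContent; infer_instance

def pvWitness_find_duplicate_db : (List (String × List (List (String × String)))) :=
  [("doc_2", [[("content", "a")], [("content", "b")]]), ("doc_1", []), ("doc_0", [[("content", "a")]])]

def Spec_find_duplicate_db (data : List (String × List (List (String × String)))) (out : Bool) : Prop := out = find_duplicate_db_alt data
instance (data : List (String × List (List (String × String)))) (out : Bool) : Decidable (Spec_find_duplicate_db data out) := by unfold Spec_find_duplicate_db; infer_instance

-- ===== CLAIM =====
def Claim_equal_find_duplicate_db : Prop := ∀ (data : List (String × List (List (String × String)))), Dom_find_duplicate_db data → Pre_find_duplicate_db data → Spec_find_duplicate_db data (find_duplicate_db data)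

-- ===== LEMMAS AND PROOFS =====

-- A's loop succeeds iff the contents are distinct and none was already seen
lemma pvLoopA_eq (items : List (List (String × String))) (seen : PySem.Set String) :
    pvLoopA items seen
      = decide ((items.map pvContent).Nodup ∧ ∀ x ∈ items.map pvContent, x ∉ seen) := by
  induction items generalizing seen with
  | nil => simp [pvLoopA]
  | cons item rest ih =>
    simp only [pvLoopA, List.map_cons, List.nodup_cons]
    by_cases h : pvContent item ∈ seen
    · rw [if_pos h]
      symm; simp only [decide_eq_false_iff_not]
      intro ⟨_, hall⟩
      exact hall _ (List.mem_cons_self ..) h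
    · rw [if_neg h, ih, decide_eq_decide]
      constructor
      · rintro ⟨hn, hall⟩
        refine ⟨⟨?_, hn⟩, ?_⟩
        · intro hmem
          exact (hall _ hmem) (by rw [PySem.Set.mem_add]; right; rfl)
        · intro x hx
          rcases List.mem_cons.mp hx with hx | hx
          · exact fun hxs => h (hx ▸ hxs)
          · intro hxs
            exact (hall _ hx) (by rw [PySem.Set.mem_add]; left; exact hxs)
      · rintro ⟨⟨hni, hn⟩, hall⟩
        refine ⟨hn, ?_⟩
        intro x hx hxadd
        rw [PySem.Set.mem_add] at hxadd
        rcases hxadd with hxs | hxe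
        · exact (hall _ (List.mem_cons_of_mem _ hx)) hxs
        · exact hni (hxe ▸ hx)

lemma pvLoopA_empty (items : List (List (String × String))) :
    pvLoopA items PySem.Set.empty = decide (items.map pvContent).Nodup := by
  rw [pvLoopA_eq, decide_eq_decide]
  simp [PySem.Set.empty]

-- on a ≤-sorted list, an adjacent equal pair exists iff the list is not Nodup
lemma pvAdjDup_of_pairwise (cs : List String) (h : cs.Pairwise (· ≤ ·)) :
    pvAdjDup cs = !decide cs.Nodup := by
  induction cs with
  | nil => simp [pvAdjDup]
  | cons x xs ih =>
    match xs, h with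
    | [], _ => simp [pvAdjDup]
    | y :: ys, h =>
      rcases List.pairwise_cons.mp h with ⟨hx, hrest⟩
      have hxy : x ≤ y := hx _ (List.mem_cons_self ..)
      simp only [pvAdjDup, List.zip, List.zipWith, List.tail, List.any_cons] at *
      by_cases hxe : x = y
      · subst hxe
        simp [List.nodup_cons]
      · have hbe : (x == y) = false := by simp [hxe]
        rw [hbe, Bool.false_or, ih hrest]
        have hxnot : x ∉ y :: ys := by
          intro hmem
          rcases List.mem_cons.mp hmem with he | hmem
          · exact hxe he
          · rcases List.pairwise_cons.mp hrest with ⟨hy, _⟩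
            exact hxe (le_antisymm hxy (hy _ hmem))
        simp [List.nodup_cons, hxnot]

lemma pvSortedDup_eq (data : List (String × List (List (String × String)))) (k : String) :
    pvSortedDup data k = !decide (((pvLookup data k).map pvContent).Nodup) := by
  unfold pvSortedDup
  rw [pvAdjDup_of_pairwise _ (PySem.List.sorted_pairwise ..)]
  have hp := PySem.List.sorted_perm ((pvLookup data k).map pvContent) (fun x => x) false
  simp [hp.nodup_iff]

-- ===== VERDICT =====
theorem find_duplicate_db_spec : Claim_equal_find_duplicate_db := by
  intro data _ _
  unfold Spec_find_duplicate_db find_duplicate_db find_duplicate_db_alt pvLoopB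
  simp only [pvLoopA_empty, pvSortedDup_eq]
  by_cases h2 : ((pvLookup data "doc_2").map pvContent).Nodup <;>
    by_cases h1 : ((pvLookup data "doc_1").map pvContent).Nodup <;>
      by_cases h0 : ((pvLookup data "doc_0").map pvContent).Nodup <;>
        simp [h2, h1, h0, pvLoopB, pvSortedDup_eq]
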